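/- GENERATED by mk_final_copies.py from the proof of the farm's unit `codebook_decode_deinterleave_repeat.6` (farm:codebook_decode_deinterleave_repeat.6.2: Proof.lean) as the
   re-elaboration sweep compiled it — do not edit. -/
import Asan.CheckWalk
import Vorbis.Spec.Units.codebook_decode_deinterleave_repeat_6

/-!
  Unit `codebook_decode_deinterleave_repeat.6` (10DF30H – 10DF6EH; stb_vorbis_fixed.c:1957 – 1959, 1909, 1918): THREE entries,
  one exit (`cut3` = 10DC9EH, the epilogue).

      cut10 = 10DF30H  `AtStore ci pi`   *c_inter_p = c_inter ; *p_inter_p = p_inter ; eax := 1     (theorem `store_back`)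
      cut11 = 10DF5FH  `AtFalse1`        eax := 0 (`if (f->last_seg) return FALSE`)               (theorem `false1`)
      cut12 = 10DF69H  `AtFalse2`        eax := 0 (FIX 10: `if (effective <= 0) return FALSE`)    (theorem `false2`)

  The two stubs store nothing: `AtEpilogue` is the carried `Common` with rax = 0 (`epilogue_of_zero`). The store-back makes
  four stores (the return address of each check call at `e.rsp − 112`, the two ints): the pure lemmas `i32_cp_after`,
  `i32_pp_after`, `reader_after`, `same_after` say what they do to the two ints, to `Bits f` / μ and to the footprint; the
  check goals are `check_site` on the precondition's `cpSite` / `ppSite`.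
-/

open X86 X86.User Asan Vorbis Vorbis.Spec Vorbis.Spec.Deint

set_option maxRecDepth 4000
set_option maxHeartbeats 4000000

namespace Vorbis.Spec.codebook_decode_deinterleave_repeat_6

/-- The int at `cp` after the store-back (return address, `*cp`, return address, `*pp`): the value stored there, when the
two ints do not meet and `cp` is off the slot of the checks' return address. -/
theorem i32_cp_after (M : Mem) (sp cp pp : Word) (r1 r2 c p : Nat) (hsp : sp.toNat + 8 ≤ 2 ^ 64)
    (hcp : cp.toNat + 4 ≤ 2 ^ 64) (hpp : pp.toNat + 4 ≤ 2 ^ 64)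
    (h1 : cp.toNat + 4 ≤ sp.toNat ∨ sp.toNat + 8 ≤ cp.toNat)
    (h2 : cp.toNat + 4 ≤ pp.toNat ∨ pp.toNat + 4 ≤ cp.toNat) :
    ((((M.writeLE sp 8 r1).writeLE cp 4 c).writeLE sp 8 r2).writeLE pp 4 p).i32 cp.toNat = sint32 (c % 2 ^ 32) := by
  rw [Mem.i32_writeLE _ pp 4 p _ hpp hcp h2]
  rw [Mem.i32_writeLE _ sp 8 r2 _ hsp hcp h1]
  have h := Mem.i32_writeLE_same (M.writeLE sp 8 r1) cp.toNat c
  rw [addr_toNat] at h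
  exact h

/-- The int at `pp` after the store-back: the last store. -/
theorem i32_pp_after (M : Mem) (pp : Word) (p : Nat) :
    (M.writeLE pp 4 p).i32 pp.toNat = sint32 (p % 2 ^ 32) := by
  have h := Mem.i32_writeLE_same M pp.toNat p
  rw [addr_toNat] at h
  exact h

/-- `Bits f` and μ over the four stores of the store-back, all off `*f`. -/
theorem reader_after {Blk : Block → Prop} {len : Nat} {M : Mem} {f : Nat} (h : Bits Blk len M f) (sp cp pp : Word)
    (r1 r2 c p : Nat) (hsp : sp.toNat + 8 ≤ 2 ^ 64) (hcp : cp.toNat + 4 ≤ 2 ^ 64) (hpp : pp.toNat + 4 ≤ 2 ^ 64)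
    (osp : sp.toNat + 8 ≤ f ∨ f + 1808 ≤ sp.toNat) (ocp : cp.toNat + 4 ≤ f ∨ f + 1808 ≤ cp.toNat)
    (opp : pp.toNat + 4 ≤ f ∨ f + 1808 ≤ pp.toNat) :
    ReaderPost Blk len M ((((M.writeLE sp 8 r1).writeLE cp 4 c).writeLE sp 8 r2).writeLE pp 4 p) f := by
  have k1 := (Vorbis.Spec.Reader.store_off_obj h sp 8 r1 hsp osp).1
  have k2 := (Vorbis.Spec.Reader.store_off_obj k1.bits cp 4 c hcp ocp).1
  have k3 := (Vorbis.Spec.Reader.store_off_obj k2.bits sp 8 r2 hsp osp).1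
  have k4 := (Vorbis.Spec.Reader.store_off_obj k3.bits pp 4 p hpp opp).1
  exact ((k1.trans k2).trans k3).trans k4

/-- The footprint over the four stores of the store-back, each inside a window. -/
theorem same_after {ws : List Span} {M0 M : Mem} (h : Mem.SameExcept ws M0 M) (sp cp pp : Word)
    (r1 r2 c p : Nat) (hsp : sp.toNat + 8 < 2 ^ 64) (hcp : cp.toNat + 4 < 2 ^ 64) (hpp : pp.toNat + 4 < 2 ^ 64)
    (isp : InSpans ws sp.toNat 8) (icp : InSpans ws cp.toNat 4) (ipp : InSpans ws pp.toNat 4) :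
    Mem.SameExcept ws M0 ((((M.writeLE sp 8 r1).writeLE cp 4 c).writeLE sp 8 r2).writeLE pp 4 p) := by
  have k1 := Mem.SameExcept.step_writeLE' sp 8 r1 h hsp isp
  have k2 := Mem.SameExcept.step_writeLE' cp 4 c k1 hcp icp
  have k3 := Mem.SameExcept.step_writeLE' sp 8 r2 k2 hsp isp
  exact Mem.SameExcept.step_writeLE' pp 4 p k3 hpp ipp


/-- A range inside the function's stack frame lies inside a window of its footprint. -/
theorem inSpans_stack (others : List Obj) (frames : List (Nat × FrameLayout)) (Blk : Block → Prop) (len : Nat) (e : State)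
    (a k : Nat) (h1 : (e.reg .rsp).toNat - 496 ≤ a) (h2 : a + k ≤ (e.reg .rsp).toNat) :
    InSpans ((codebook_decode_deinterleave_repeat.spec others frames Blk len).footprint e) a k := by
  refine ⟨⟨(e.reg .rsp).toNat - 496, (e.reg .rsp).toNat⟩, ?_, h1, h2⟩
  exact List.mem_cons_self

/-- `*c_inter_p` is a window of the footprint. -/
theorem inSpans_cp (others : List Obj) (frames : List (Nat × FrameLayout)) (Blk : Block → Prop) (len : Nat) (e : State) :
    InSpans ((codebook_decode_deinterleave_repeat.spec others frames Blk len).footprint e) (e.reg .r8).toNat 4 := by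
  refine ⟨⟨(e.reg .r8).toNat, (e.reg .r8).toNat + 4⟩, ?_, Nat.le_refl _, Nat.le_refl _⟩
  refine List.mem_cons_of_mem _ ?_
  show _ ∈ deint.wins e
  unfold deint.wins
  exact List.mem_append_left _ (List.mem_append_right _ List.mem_cons_self)

/-- `*p_inter_p` is a window of the footprint. -/
theorem inSpans_pp (others : List Obj) (frames : List (Nat × FrameLayout)) (Blk : Block → Prop) (len : Nat) (e : State) :
    InSpans ((codebook_decode_deinterleave_repeat.spec others frames Blk len).footprint e) (e.reg .r9).toNat 4 := by
  refine ⟨⟨(e.reg .r9).toNat, (e.reg .r9).toNat + 4⟩, ?_, Nat.le_refl _, Nat.le_refl _⟩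
  refine List.mem_cons_of_mem _ ?_
  show _ ∈ deint.wins e
  unfold deint.wins
  exact List.mem_append_left _ (List.mem_append_right _ (List.mem_cons_of_mem _ List.mem_cons_self))

/-- The dword a `mov [m32], r32` stores from a register that holds a small number. -/
theorem part32_small (n : Nat) (h : n < 2 ^ 32) : (Word.part .w32 (UInt64.ofNat n)).toNat = n := by
  rw [Vorbis.toNat_part32, UInt64.toNat_ofNat']
  omega

/-- The signed reading of a small dword. -/
theorem sint32_small (n : Nat) (h : n < 2 ^ 31) : sint32 (n % 2 ^ 32) = (n : Int) := by
  have e : n % 2 ^ 32 = n := Nat.mod_eq_of_lt (by omega)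
  rw [e]
  rcases sint32_cases n with ⟨_, h2⟩ | ⟨h1, _⟩
  · exact h2
  · omega

/-- **The epilogue's assertion with result 0**, at a state `s` that differs from a state `u` with `Common` only in rax and rip:
the two ints are as at entry (`Common.cInt`, `.pInt`), everything else is carried. What both `eax := 0` stubs end with. -/
theorem epilogue_of_zero {others : List Obj} {frames : List (Nat × FrameLayout)} {Blk : Block → Prop} {len : Nat} {u₀ : State}
    {ret : Word} {e u s : State} (hcommon : Common others frames Blk len u₀ ret e u)
    (hrip : s.rip = Vorbis.L.codebook_decode_deinterleave_repeat.cut3) (hrsp : s.reg .rsp = u.reg .rsp)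
    (hmem : s.mem = u.mem) (hrax : s.reg .rax = 0) (hinv : abiInv s) :
    AtEpilogue others frames Blk len u₀ ret e s := by
  have hmid := hcommon.mid
  refine ⟨hrip, ?mid, ?reader, Or.inl hrax, ?one, ?zero⟩
  case mid =>
    refine ⟨hmid.atEntry, ?_, ?_, ?_, ?_, ?_, ?_, ?_, ?_, ?_, ?_, hinv, ?_⟩
    · rw [hrsp]
      exact hmid.rsp
    · rw [hmem]
      exact hmid.ra
    · rw [hmem]
      exact hmid.r15
    · rw [hmem]
      exact hmid.r14
    · rw [hmem]
      exact hmid.r13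
    · rw [hmem]
      exact hmid.r12
    · rw [hmem]
      exact hmid.rbp
    · rw [hmem]
      exact hmid.rbx
    · rw [hmem]
      exact hmid.same
    · rw [hmem]
      exact hmid.code
    · rw [hmem]
      exact hmid.untouched
  case reader =>
    rw [hmem]
    exact hcommon.reader
  case one =>
    intro h1
    rw [hrax] at h1
    exact absurd h1 (by decide)
  case zero =>
    intro _
    rw [hmem]
    exact ⟨hcommon.cInt, hcommon.pInt⟩

/-- **10DF5FH** (`cut11`; stb_vorbis_fixed.c:1909 `if (f->last_seg) return FALSE;`): `mov eax, 0 ; jmp 10DC9EH`. -/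
theorem false1 {Lay : Layout} (hLay : Lay.hi = 0x1000000) {μ : Microarch} (hμ : UserX.MicroOK μ) {u₀ : State}
    (hcode : HasCodeNat Lay u₀ Vorbis.L.codebook_decode_deinterleave_repeat.entry
      Vorbis.Code.code_codebook_decode_deinterleave_repeat.nat Vorbis.L.codebook_decode_deinterleave_repeat.size)
    (others : List Obj) (frames : List (Nat × FrameLayout)) (Blk : Block → Prop) (len : Nat) (ret : Word) (e u : State)
    (hat : AtFalse1 others frames Blk len u₀ ret e u) :
    ReachVia Lay μ WayInv u (fun v => AtEpilogue others frames Blk len u₀ ret e v) := by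
  obtain ⟨w_rip, hcommon⟩ := hat
  have hmid := hcommon.mid
  have he := hmid.atEntry
  v_entry he
  have hrsp : u.reg .rsp = e.reg .rsp - 104 := hmid.rsp
  have w_eq : Mem.EqOn Vorbis.L.textLo Vorbis.L.textHi u₀.mem u.mem := hmid.code
  have hdf : u.flags .df = false := (show abiInv _ from hmid.inv).1
  have hmx : u.mxcsr &&& 0x1F80 = 0x1F80 := (show abiInv _ from hmid.inv).2
  have hsse := Vorbis.sseOK_of_abiInv hmid.inv
  u_walk hcode [hμ.vendor] until [Vorbis.L.codebook_decode_deinterleave_repeat.cut3] span [Vorbis.L.textLo, Vorbis.L.textHi] side (v_side)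
  -- 10DC9EH, the epilogue
  refine ReachVia.done (epilogue_of_zero hcommon w_rip (w_kept .rsp rfl) w_mem w_rax ?_)
  v_inv

/-- **10DF69H** (`cut12`; stb_vorbis_fixed.c:1918, FIX 10 `if (effective <= 0) return FALSE;`): `mov eax, 0 ; jmp 10DC9EH`. -/
theorem false2 {Lay : Layout} (hLay : Lay.hi = 0x1000000) {μ : Microarch} (hμ : UserX.MicroOK μ) {u₀ : State}
    (hcode : HasCodeNat Lay u₀ Vorbis.L.codebook_decode_deinterleave_repeat.entry
      Vorbis.Code.code_codebook_decode_deinterleave_repeat.nat Vorbis.L.codebook_decode_deinterleave_repeat.size)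
    (others : List Obj) (frames : List (Nat × FrameLayout)) (Blk : Block → Prop) (len : Nat) (ret : Word) (e u : State)
    (hat : AtFalse2 others frames Blk len u₀ ret e u) :
    ReachVia Lay μ WayInv u (fun v => AtEpilogue others frames Blk len u₀ ret e v) := by
  obtain ⟨w_rip, hcommon⟩ := hat
  have hmid := hcommon.mid
  have he := hmid.atEntry
  v_entry he
  have hrsp : u.reg .rsp = e.reg .rsp - 104 := hmid.rsp
  have w_eq : Mem.EqOn Vorbis.L.textLo Vorbis.L.textHi u₀.mem u.mem := hmid.code
  have hdf : u.flags .df = false := (show abiInv _ from hmid.inv).1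
  have hmx : u.mxcsr &&& 0x1F80 = 0x1F80 := (show abiInv _ from hmid.inv).2
  have hsse := Vorbis.sseOK_of_abiInv hmid.inv
  u_walk hcode [hμ.vendor] until [Vorbis.L.codebook_decode_deinterleave_repeat.cut3] span [Vorbis.L.textLo, Vorbis.L.textHi] side (v_side)
  -- 10DC9EH, the epilogue
  refine ReachVia.done (epilogue_of_zero hcommon w_rip (w_kept .rsp rfl) w_mem w_rax ?_)
  v_inv

/-- **10DF30H** (`cut10`; stb_vorbis_fixed.c:1957 – 1959): `*c_inter_p = c_inter ; *p_inter_p = p_inter ; return TRUE`. Two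
checked 4-byte stores through the pointers spilled at `[rsp+20H]`, `[rsp+28H]`; the values are ebp and the dword at `[rsp+8]`.
The exit assertion: `Mid` over the four stores, `Bits f` (the stores are off `*f`: `DeintApart.cpObj`, `.ppObj`), and CI of the
stored ints (`InterAt` from the carried `Res.InterOK ci pi`). -/
theorem store_back {Lay : Layout} (hLay : Lay.hi = 0x1000000) {μ : Microarch} (hμ : UserX.MicroOK μ) {u₀ : State}
    (hcode : HasCodeNat Lay u₀ Vorbis.L.codebook_decode_deinterleave_repeat.entry
      Vorbis.Code.code_codebook_decode_deinterleave_repeat.nat Vorbis.L.codebook_decode_deinterleave_repeat.size)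
    (hstore4 : Asan.SmallCheck Lay μ Vorbis.WayInv (Vorbis.CodeOK u₀) [.rax, .rcx, .rdx] 4 Vorbis.L.__asan_store4_noabort.entry)
    (others : List Obj) (frames : List (Nat × FrameLayout)) (Blk : Block → Prop) (len : Nat) (ret : Word) (e u : State)
    (ci pi : Nat)
    (hat : AtStore others frames Blk len u₀ ret e ci pi u) :
    ReachVia Lay μ WayInv u (fun v => AtEpilogue others frames Blk len u₀ ret e v) := by
  obtain ⟨w_rip, hcommon, hrbp, hpiSlot, hinter⟩ := hat
  have hmid := hcommon.mid
  have hpre := hcommon.pre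
  have he := hmid.atEntry
  v_entry he
  have hrsp : u.reg .rsp = e.reg .rsp - 104 := hmid.rsp
  have w_eq : Mem.EqOn Vorbis.L.textLo Vorbis.L.textHi u₀.mem u.mem := hmid.code
  have hdf : u.flags .df = false := (show abiInv _ from hmid.inv).1
  have hmx : u.mxcsr &&& 0x1F80 = 0x1F80 := (show abiInv _ from hmid.inv).2
  have hsse := Vorbis.sseOK_of_abiInv hmid.inv
  -- the two spilled pointers the segment loads (`[rsp+20H]`, `[rsp+28H]`)
  have hcpSlot := hcommon.cpSlot
  have hppSlot := hcommon.ppSlot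
  -- where the two ints are: above the text, in the data space, off the stack below the argument slots (`DeintPre.args`)
  have hsh := hpre.book.reader.shadow
  have hun0 : Mem.EqOn 0xC00000 0xE00000 e.mem u.mem := hmid.untouched
  have hwcp : 0x119d40 ≤ (e.reg .r8).toNat ∧ (e.reg .r8).toNat + 4 ≤ 0xC00000 ∧
      ((e.reg .rsp).toNat + 24 ≤ (e.reg .r8).toNat ∨ (e.reg .r8).toNat + 4 ≤ 0x700000 ∨
        0x800000 ≤ (e.reg .r8).toNat) :=
    site_where hpre.args hsh.offText (by omega) hpre.cpSite
  have hwpp : 0x119d40 ≤ (e.reg .r9).toNat ∧ (e.reg .r9).toNat + 4 ≤ 0xC00000 ∧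
      ((e.reg .rsp).toNat + 24 ≤ (e.reg .r9).toNat ∨ (e.reg .r9).toNat + 4 ≤ 0x700000 ∨
        0x800000 ≤ (e.reg .r9).toNat) :=
    site_where hpre.args hsh.offText (by omega) hpre.ppSite
  u_walk hcode [hμ.vendor] until [Vorbis.L.codebook_decode_deinterleave_repeat.cut3] span [Vorbis.L.textLo, Vorbis.L.textHi] side (v_side)
  case check_10df41 =>
    -- 10DF41H, the check of `*c_inter_p = c_inter` (C line 1957): `Live(c_inter_p, 4)` of the precondition
    have hun : ShadowUntouched e.mem s_10df41.mem := by v_untouched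
    exact Vorbis.Spec.check_site hpre.args hun hpre.cpSite rfl
  case check_10df4d =>
    -- 10DF4DH, the check of `*p_inter_p = p_inter` (C line 1958): `Live(p_inter_p, 4)` of the precondition
    have hun : ShadowUntouched e.mem s_10df4d.mem := by v_untouched
    exact Vorbis.Spec.check_site hpre.args hun hpre.ppSite rfl
  -- 10DC9EH, the epilogue: the exit assertion
  -- the two values are small: `c_inter < ch ≤ 16`, `p_inter ≤ len ≤ 4096`
  have hci : ci < 16 := by
    have h1 : ci < argU32 (e.reg .rcx) := hinter.c_lt
    have h2 := hpre.ch_le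
    omega
  have hpi : pi ≤ 4096 := by
    have h1 : pi ≤ e.mem.u32 ((e.reg .rsp).toNat + 8) := hinter.p_le
    have h2 := hpre.len_le
    omega
  have v1 : (Word.part .w32 (UInt64.ofNat ci)).toNat = ci := part32_small ci (by omega)
  have v2 : (BitVec.ofNat 32 pi).toNat = pi := by
    rw [BitVec.toNat_ofNat]
    omega
  rw [v1, v2] at w_mem
  -- where the slot of the checks' return address, the two ints and `*f` are
  have hsp112 : (e.reg .rsp - 112).toNat = (e.reg .rsp).toNat - 112 := by u_omega
  have hints : (e.reg .r8).toNat + 4 ≤ (e.reg .r9).toNat ∨ (e.reg .r9).toNat + 4 ≤ (e.reg .r8).toNat :=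
    hpre.apart.ints
  have hcpf : (e.reg .r8).toNat + 4 ≤ (e.reg .rdi).toNat ∨ (e.reg .rdi).toNat + 1808 ≤ (e.reg .r8).toNat :=
    hpre.apart.cpObj
  have hppf : (e.reg .r9).toNat + 4 ≤ (e.reg .rdi).toNat ∨ (e.reg .rdi).toNat + 1808 ≤ (e.reg .r9).toNat :=
    hpre.apart.ppObj
  have hwf := hpre.book.reader.where_obj
  -- the two ints in the final memory
  have hc32 : s_10df5a.mem.i32 (e.reg .r8).toNat = (ci : Int) := by
    rw [w_mem, i32_cp_after _ _ _ _ _ _ _ _ (by omega) (by omega) (by omega) (by omega) hints]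
    exact sint32_small ci (by omega)
  have hp32 : s_10df5a.mem.i32 (e.reg .r9).toNat = (pi : Int) := by
    rw [w_mem, i32_pp_after]
    exact sint32_small pi (by omega)
  refine ReachVia.done ⟨w_rip, ?mid, ?reader, ?result, ?one, ?zero⟩
  case mid =>
    refine ⟨he, w_rsp, ?_, ?_, ?_, ?_, ?_, ?_, ?_, ?same, w_eq, ?abi, ?untouched⟩
    case same =>
      rw [w_mem]
      refine same_after hmid.same _ _ _ _ _ _ _ (by omega) (by omega) (by omega) ?_ ?_ ?_
      · exact inSpans_stack others frames Blk len e _ 8 (by omega) (by omega)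
      · exact inSpans_cp others frames Blk len e
      · exact inSpans_pp others frames Blk len e
    case abi => v_inv
    case untouched => v_untouched
    -- the return address and the six saved registers: their slots are off the four stores
    · u_frame hmid.ra
    · u_frame hmid.r15
    · u_frame hmid.r14
    · u_frame hmid.r13
    · u_frame hmid.r12
    · u_frame hmid.rbp
    · u_frame hmid.rbx
  case reader =>
    have hrd : ReaderPost Blk len e.mem u.mem (e.reg .rdi).toNat := hcommon.reader
    show ReaderPost Blk len e.mem s_10df5a.mem (e.reg .rdi).toNat
    rw [w_mem]
    exact hrd.trans
      (reader_after hrd.bits _ _ _ _ _ _ _ (by omega) (by omega) (by omega) (by omega) hcpf hppf)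
  case result =>
    exact Or.inr w_rax
  case one =>
    intro _
    refine ⟨?_, ?_, ?_⟩
    · show 0 ≤ s_10df5a.mem.i32 (e.reg .r8).toNat
      rw [hc32]
      exact Int.natCast_nonneg _
    · show 0 ≤ s_10df5a.mem.i32 (e.reg .r9).toNat
      rw [hp32]
      exact Int.natCast_nonneg _
    · show Res.InterOK (s_10df5a.mem.i32 (e.reg .r8).toNat).toNat (s_10df5a.mem.i32 (e.reg .r9).toNat).toNat _ _
      rw [hc32, hp32, Int.toNat_natCast, Int.toNat_natCast]
      exact hinter
  case zero =>
    intro h0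
    rw [w_rax] at h0
    exact absurd h0 (by decide)

end Vorbis.Spec.codebook_decode_deinterleave_repeat_6

/-- Segment 6 of `codebook_decode_deinterleave_repeat`: each of its three entry assertions (`AtStore`, `AtFalse1`, `AtFalse2`)
is taken to the epilogue's assertion `AtEpilogue`. -/
theorem Vorbis.Spec.Worked.codebook_decode_deinterleave_repeat_6_ok : Vorbis.Spec.codebook_decode_deinterleave_repeat_6.Statement := by
  unfold Vorbis.Spec.codebook_decode_deinterleave_repeat_6.Statement
  intro Lay hLay μ hμ u₀ hcode hstore4 others frames Blk len ret e u hat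
  rcases hat with ⟨ci, pi, hs⟩ | hf1 | hf2
  · exact Vorbis.Spec.codebook_decode_deinterleave_repeat_6.store_back hLay hμ hcode hstore4 others frames Blk len ret e u ci pi hs
  · exact Vorbis.Spec.codebook_decode_deinterleave_repeat_6.false1 hLay hμ hcode others frames Blk len ret e u hf1
  · exact Vorbis.Spec.codebook_decode_deinterleave_repeat_6.false2 hLay hμ hcode others frames Blk len ret e u hf2
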